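-- pv_equiv track=rewrite | github.com/MaRcR11/aoc | py/2025/6/2.py | solve
-- ===== SOURCE A (Python) =====
-- def solve(input_data: str) -> str:
--     lines = input_data.rstrip("\n").split("\n")
--     H, W = len(lines), max(len(l) for l in lines)
--     g = [l.ljust(W) for l in lines]
--     sc = [all(g[r][c] == " " for r in range(H)) for c in range(W)]
--     seg, i = [], 0
--
--     while i < W:
--         if sc[i]:
--             i += 1
--         else:
--             j = i
--             while j < W and not sc[j]:
--                 j += 1
--             seg.append((i, j))
--             i = j
--     t = 0
--     for a, b in seg:
--         nums = []
--         for c in range(a, b):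
--             col = "".join(g[r][c] for r in range(H - 1)).strip()
--             if col and col.isdigit():
--                 nums.append(int(col))
--         op = g[H - 1][a:b].strip()
--         v = sum(nums) if op == "+" else 1
--         if op != "+":
--             for x in nums:
--                 v *= x
--         t += v
--     return str(t)
-- ===== SOURCE B (Python) =====
-- def solve(input_data: str) -> str:
--     lines = input_data.rstrip("\n").split("\n")
--     W = max(len(l) for l in lines)
--     g = [l.ljust(W) for l in lines]
--     total, s, p, op, in_seg = 0, 0, 1, "", False
--     for c in range(W):
--         col = "".join(row[c] for row in g)
--         if all(ch == " " for ch in col):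
--             if in_seg:
--                 total += s if op.strip() == "+" else p
--             s, p, op, in_seg = 0, 1, "", False
--         else:
--             head = col[:-1].strip()
--             if head.isdigit():
--                 n = int(head)
--                 s += n
--                 p *= n
--             op += col[-1]
--             in_seg = True
--     if in_seg:
--         total += s if op.strip() == "+" else p
--     return str(total)
-- ===== Notes on version B (the rewrite author's own statement) =====
-- stated objective: alternative
-- what changed: B replaces A's staged pipeline (precomputed blank-column flag array, segment-list construction via nested while loops, then per-segment index-range re-reads of the grid) by one streaming left-to-right pass over the columns with a constant-size accumulator (running sum, running product, operator buffer, in-segment flag) that flushes on blank columns, never materialising segments or column flags.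
import Mathlib
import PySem

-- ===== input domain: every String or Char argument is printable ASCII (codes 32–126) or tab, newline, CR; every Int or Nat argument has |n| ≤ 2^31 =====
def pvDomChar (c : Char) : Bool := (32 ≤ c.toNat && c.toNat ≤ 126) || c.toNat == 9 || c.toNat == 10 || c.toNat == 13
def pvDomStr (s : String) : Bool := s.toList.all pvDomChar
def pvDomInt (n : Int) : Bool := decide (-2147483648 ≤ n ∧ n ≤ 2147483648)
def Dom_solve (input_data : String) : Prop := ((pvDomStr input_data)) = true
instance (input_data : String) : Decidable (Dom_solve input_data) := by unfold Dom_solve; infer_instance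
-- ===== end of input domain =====

-- B replaces A's staged pipeline (blank-column flag array, segment list built by nested while
-- loops, per-segment index-range re-reads) by ONE streaming pass over the columns with a
-- constant-size accumulator (running sum, running product, operator buffer, in-segment flag)
-- that flushes on blank columns: an alternative decomposition of the same cost.

-- shared helpers (both Pythons share the parsing prefix)
-- hand port of s.rstrip("\n") — drop trailing '\n' only; exact
def rstripNl (cs : List Char) : List Char := (cs.reverse.dropWhile (· == '\n')).reverse
-- hand port of l.ljust(W) — pad on the right with spaces to width W; exact
def ljustSp (cs : List Char) (w : Nat) : List Char := cs ++ List.replicate (w - cs.length) ' '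

-- ===== PORT A =====
-- inner 'while j < W and not sc[j]: j += 1'
def scanJ (sc : List Bool) (j : Nat) : Nat :=
  if h : j < sc.length ∧ sc.getD j false = false then scanJ sc (j + 1) else j
termination_by sc.length - j
decreasing_by omega

theorem le_scanJ (sc : List Bool) (j : Nat) : j ≤ scanJ sc j := by
  fun_induction scanJ sc j with
  | case1 j _ ih => omega
  | case2 j _ => omega

theorem lt_scanJ (sc : List Bool) (j : Nat) (h1 : j < sc.length) (h2 : sc.getD j false = false) :
    j < scanJ sc j := by
  rw [scanJ]; rw [dif_pos ⟨h1, h2⟩]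
  exact Nat.lt_of_lt_of_le (Nat.lt_succ_self j) (le_scanJ sc (j + 1))

-- outer 'while i < W' building seg
def segLoop (sc : List Bool) (i : Nat) (acc : List (Nat × Nat)) : List (Nat × Nat) :=
  if h : i < sc.length then
    if hb : sc.getD i false then segLoop sc (i + 1) acc
    else
      segLoop sc (scanJ sc i) (acc ++ [(i, scanJ sc i)])
  else acc
termination_by sc.length - i
decreasing_by
  · omega
  · have := lt_scanJ sc i h (by simpa using hb); omega

def solve (input_data : String) : String :=
  let lines := PySem.Chars.splitOn (rstripNl input_data.toList) ['\n']
  let H := lines.length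
  -- max(len(l) for l in lines): max of the (nonempty) list of lengths; the running max from 0 is exact here
  let W := (lines.map List.length).foldl max 0
  let g := lines.map (fun l => ljustSp l W)
  let sc := (List.range W).map (fun c => (List.range H).all (fun r => ((g.getD r []).getD c ' ') == ' '))
  let seg := segLoop sc 0 []
  let t := seg.foldl (fun t ab =>
    let nums := (List.range' ab.1 (ab.2 - ab.1)).foldl (fun nums c =>
      let col := PySem.Chars.strip ((List.range (H - 1)).map (fun r => (g.getD r []).getD c ' '))
      if col ≠ [] ∧ PySem.Chars.strIsdigit col then nums ++ [(PySem.Int.ofChars? col).getD 0]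
      else nums) ([] : List Int)
    let op := PySem.Chars.strip (PySem.List.slice (g.getD (H - 1) []) (some (ab.1 : Int)) (some (ab.2 : Int)))
    let v := if op = ['+'] then nums.sum else nums.foldl (· * ·) 1
    t + v) (0 : Int)
  PySem.Int.toStr t

-- ===== PORT B =====
-- the final (and blank-column) flush: 'total += s if op.strip() == "+" else p' guarded by in_seg
def finishB (st : Int × Int × Int × List Char × Bool) : Int :=
  match st with
  | (total, s, p, op, inSeg) =>
    if inSeg then total + (if PySem.Chars.strip op = ['+'] then s else p) else total

-- one iteration of B's 'for c in range(W)' body, acting on the already-joined column string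
def stepB (col : List Char) (st : Int × Int × Int × List Char × Bool) :
    Int × Int × Int × List Char × Bool :=
  match st with
  | (total, s, p, op, _inSeg) =>
    if col.all (· == ' ') then (finishB st, 0, 1, [], false)
    else
      let head := PySem.Chars.strip col.dropLast
      let sp := if PySem.Chars.strIsdigit head then
          (s + (PySem.Int.ofChars? head).getD 0, p * (PySem.Int.ofChars? head).getD 0)
        else (s, p)
      (total, sp.1, sp.2, op ++ [PySem.List.pyGetD col (-1) ' '], true)

def solve_alt (input_data : String) : String :=
  let lines := PySem.Chars.splitOn (rstripNl input_data.toList) ['\n']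
  let W := (lines.map List.length).foldl max 0
  let g := lines.map (fun l => ljustSp l W)
  let fin := (List.range W).foldl
    (fun st c => stepB (g.map (fun row => row.getD c ' ')) st)
    ((0 : Int), (0 : Int), (1 : Int), ([] : List Char), false)
  PySem.Int.toStr (finishB fin)

-- ===== PRECONDITION & SPEC =====
def Spec_solve (input_data : String) (out : String) : Prop := out = solve_alt input_data
instance (input_data : String) (out : String) : Decidable (Spec_solve input_data out) := by unfold Spec_solve; infer_instance

-- ===== CLAIM (what is proved, stated in full; the proofs are below) =====
def Claim_equal_solve : Prop := ∀ (input_data : String), Dom_solve input_data → Spec_solve input_data (solve input_data)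

-- ===== LEMMAS AND PROOFS =====

-- proof-side views shared by both directions
def colAt (g : List (List Char)) (c : Nat) : List Char := g.map (fun row => row.getD c ' ')

def colsOf (g : List (List Char)) (W : Nat) : List (List Char) := (List.range W).map (colAt g)

def isBlankCol (col : List Char) : Bool := col.all (· == ' ')

-- maximal runs of non-blank columns
def groupRuns (cols : List (List Char)) : List (List (List Char)) :=
  match cols with
  | [] => []
  | c :: rest =>
    if isBlankCol c then groupRuns rest
    else (c :: rest.takeWhile (fun d => !isBlankCol d)) :: groupRuns (rest.dropWhile (fun d => !isBlankCol d))
termination_by cols.length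
decreasing_by
  · simp
  · have := List.length_dropWhile_le (fun d => !isBlankCol d) rest; simp; omega

-- the numbers of a block of columns, and the block's contribution to the total
def numsOf (block : List (List Char)) : List Int :=
  (block.filter (fun col => PySem.Chars.strIsdigit (PySem.Chars.strip col.dropLast))).map
    (fun col => (PySem.Int.ofChars? (PySem.Chars.strip col.dropLast)).getD 0)

def valBlock (block : List (List Char)) : Int :=
  if PySem.Chars.strip (block.map (fun col => PySem.List.pyGetD col (-1) ' ')) = ['+']
  then (numsOf block).sum else (numsOf block).foldl (· * ·) 1

theorem takeWhile_eq_take_len {α : Type} (p : α → Bool) (l : List α) :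
    l.takeWhile p = l.take (l.takeWhile p).length := by
  induction l with
  | nil => rfl
  | cons x xs ih =>
    by_cases h : p x
    · simp [h]; exact ih
    · simp [h]

theorem dropWhile_eq_drop_len {α : Type} (p : α → Bool) (l : List α) :
    l.dropWhile p = l.drop (l.takeWhile p).length := by
  induction l with
  | nil => rfl
  | cons x xs ih =>
    by_cases h : p x
    · simp [h]; exact ih
    · simp [h]

theorem range_map_getD {α : Type} (l : List α) (d : α) (n : Nat) (h : n ≤ l.length) :
    (List.range n).map (fun r => l.getD r d) = l.take n := by
  apply List.ext_getElem
  · simp; omega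
  · intro i h1 h2
    simp at h1 ⊢
    rw [List.getElem?_eq_getElem (by omega)]
    simp

theorem range'_map_getD {α : Type} (l : List α) (d : α) (a m : Nat) (h : a + m ≤ l.length) :
    (List.range' a m).map (fun c => l.getD c d) = (l.drop a).take m := by
  apply List.ext_getElem
  · simp; omega
  · intro i h1 h2
    simp at h1 ⊢
    rw [List.getElem?_eq_getElem (by omega)]
    simp

theorem range_drop_take (a m W : Nat) (h : a + m ≤ W) :
    ((List.range W).drop a).take m = List.range' a m := by
  apply List.ext_getElem
  · simp; omega
  · intro i h1 h2; simp at h1 ⊢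

theorem range_all_getD {α : Type} (l : List α) (f : α → Bool) (d : α) :
    ((List.range l.length).all fun r => f (l.getD r d)) = l.all f := by
  rw [Bool.eq_iff_iff]
  simp only [List.all_eq_true, List.mem_range]
  constructor
  · intro h x hx
    obtain ⟨i, hi, rfl⟩ := List.mem_iff_getElem.mp hx
    have := h i hi
    rwa [List.getD_eq_getElem?_getD, List.getElem?_eq_getElem hi, Option.getD_some] at this
  · intro h r hr
    rw [List.getD_eq_getElem?_getD, List.getElem?_eq_getElem hr, Option.getD_some]
    exact h _ (List.getElem_mem _)

-- splitOn never returns the empty list (Python split always yields at least one piece)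
theorem splitOn_go_ne_nil (sep : List Char) (fuel : Nat) (l cur : List Char) (acc : List (List Char)) :
    PySem.Chars.splitOn.go sep fuel l cur acc ≠ [] := by
  induction fuel generalizing l cur acc with
  | zero => simp [PySem.Chars.splitOn.go]
  | succ n ih =>
    cases l with
    | nil => simp [PySem.Chars.splitOn.go]
    | cons c rest =>
      rw [PySem.Chars.splitOn.go]
      split
      · exact ih _ _ _
      · exact ih _ _ _

theorem splitOn_ne_nil (cs sep : List Char) : PySem.Chars.splitOn cs sep ≠ [] :=
  splitOn_go_ne_nil _ _ _ _ _

-- ---------- A side: segments ----------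

-- A's segment builder without the accumulator
def segsFrom (sc : List Bool) (i : Nat) : List (Nat × Nat) :=
  if h : i < sc.length then
    if hb : sc.getD i false then segsFrom sc (i + 1)
    else (i, scanJ sc i) :: segsFrom sc (scanJ sc i)
  else []
termination_by sc.length - i
decreasing_by
  · omega
  · have := lt_scanJ sc i h (by simpa using hb); omega

theorem segLoop_eq (sc : List Bool) (i : Nat) (acc : List (Nat × Nat)) :
    segLoop sc i acc = acc ++ segsFrom sc i := by
  fun_induction segLoop sc i acc with
  | case1 i acc h hb ih => rw [segsFrom, dif_pos h, dif_pos hb]; exact ih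
  | case2 i acc h hb ih => rw [segsFrom, dif_pos h, dif_neg hb, ih]; simp
  | case3 i acc h => rw [segsFrom, dif_neg h]; simp

theorem scanJ_edge (cols : List (List Char)) (i : Nat) (hi : cols.length ≤ i) :
    scanJ (cols.map isBlankCol) i = i := by
  rw [scanJ, dif_neg]; simp; omega

theorem scanJ_spec (cols : List (List Char)) :
    ∀ n i, cols.length - i ≤ n → i ≤ cols.length →
    scanJ (cols.map isBlankCol) i
      = i + ((cols.drop i).takeWhile (fun d => !isBlankCol d)).length := by
  intro n
  induction n with
  | zero =>
    intro i hn hi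
    have hie : i = cols.length := by omega
    rw [scanJ_edge cols i (by omega), hie, List.drop_length]
    simp
  | succ n ih =>
    intro i hn hi
    by_cases h1 : i < cols.length
    · have hdrop : cols.drop i = cols[i] :: cols.drop (i + 1) := (List.getElem_cons_drop h1).symm
      have hsome : cols[i]? = some cols[i] := List.getElem?_eq_getElem h1
      by_cases hb : isBlankCol cols[i]
      · rw [scanJ, dif_neg (by simp [hsome, hb])]
        rw [hdrop, List.takeWhile_cons]
        simp [hb]
      · rw [scanJ, dif_pos ⟨by simpa using h1, by simp [hsome, hb]⟩]
        rw [ih (i + 1) (by omega) (by omega), hdrop, List.takeWhile_cons]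
        simp [hb]
        omega
    · have hie : i = cols.length := by omega
      rw [scanJ_edge cols i (by omega), hie, List.drop_length]
      simp

theorem segs_map (cols : List (List Char)) (fA : Nat × Nat → Int) (fB : List (List Char) → Int)
    (hf : ∀ a b : Nat, a ≤ b → b ≤ cols.length → fA (a, b) = fB ((cols.drop a).take (b - a))) :
    ∀ n i, cols.length - i ≤ n → i ≤ cols.length →
    (segsFrom (cols.map isBlankCol) i).map fA = (groupRuns (cols.drop i)).map fB := by
  intro n
  induction n with
  | zero =>
    intro i hn hi
    have hie : i = cols.length := by omega
    rw [segsFrom, dif_neg (by simp; omega), hie, List.drop_length, groupRuns]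
    simp
  | succ n ih =>
    intro i hn hi
    by_cases h1 : i < cols.length
    · have hdrop : cols.drop i = cols[i] :: cols.drop (i + 1) := (List.getElem_cons_drop h1).symm
      have hsome : cols[i]? = some cols[i] := List.getElem?_eq_getElem h1
      by_cases hb : isBlankCol cols[i]
      · rw [segsFrom, dif_pos (by simpa using h1), dif_pos (by simp [hsome, hb]), hdrop, groupRuns,
          if_pos hb]
        exact ih (i + 1) (by omega) (by omega)
      · -- non-blank run
        have hj := scanJ_spec cols (n + 1) i hn hi
        set tw := (cols.drop i).takeWhile (fun d => !isBlankCol d) with htw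
        have htwlen : tw.length ≤ cols.length - i := by
          have := (List.takeWhile_sublist (p := fun d => !isBlankCol d) (l := cols.drop i)).length_le
          simp at this
          omega
        have hjge : 1 ≤ tw.length := by
          rw [htw, hdrop, List.takeWhile_cons]
          simp [hb]
        rw [segsFrom, dif_pos (by simpa using h1), dif_neg (by simp [hsome, hb])]
        rw [hdrop, groupRuns, if_neg hb]
        simp only [List.map_cons]
        congr 1
        · -- head values agree
          rw [hj, hf i (i + tw.length) (by omega) (by omega)]
          have h0 : i + tw.length - i = tw.length := by omega
          rw [h0, htw, ← takeWhile_eq_take_len]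
          rw [hdrop, List.takeWhile_cons]
          simp [hb]
        · -- tails agree
          rw [hj]
          have h2 : cols.drop (i + tw.length) = (cols.drop (i + 1)).dropWhile (fun d => !isBlankCol d) := by
            rw [dropWhile_eq_drop_len, List.drop_drop]
            have h3 : ((cols.drop (i + 1)).takeWhile (fun d => !isBlankCol d)).length = tw.length - 1 := by
              rw [htw, hdrop, List.takeWhile_cons]
              simp [hb]
            rw [h3]
            congr 1
            omega
          rw [← h2]
          exact ih (i + tw.length) (by omega) (by omega)
    · have hie : i = cols.length := by omega
      rw [segsFrom, dif_neg (by simp; omega), hie, List.drop_length, groupRuns]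
      simp

theorem sc_eq (g : List (List Char)) (W : Nat) :
    (List.range W).map (fun c => (List.range g.length).all (fun r => ((g.getD r []).getD c ' ') == ' '))
      = (colsOf g W).map isBlankCol := by
  unfold colsOf
  rw [List.map_map]
  apply List.map_congr_left
  intro c _
  rw [range_all_getD g (fun row => row.getD c ' ' == ' ') []]
  unfold Function.comp isBlankCol colAt
  rw [List.all_map]
  rfl

theorem block_eq (g : List (List Char)) (W a b : Nat) (hab : a ≤ b) (hbW : b ≤ W) :
    ((colsOf g W).drop a).take (b - a) = (List.range' a (b - a)).map (colAt g) := by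
  unfold colsOf
  rw [← List.map_drop, ← List.map_take, range_drop_take a (b - a) W (by omega)]

theorem stripA_eq (g : List (List Char)) (c : Nat) :
    (List.range (g.length - 1)).map (fun r => (g.getD r []).getD c ' ') = (colAt g c).dropLast := by
  have h1 : (List.range (g.length - 1)).map (fun r => (g.getD r []).getD c ' ')
      = ((List.range (g.length - 1)).map (fun r => g.getD r [])).map (fun row => row.getD c ' ') := by
    rw [List.map_map]; rfl
  rw [h1, range_map_getD g [] (g.length - 1) (by omega)]
  unfold colAt
  rw [← List.map_dropLast, List.dropLast_eq_take]

theorem strIsdigit_cond (s : List Char) :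
    (decide (s ≠ [] ∧ PySem.Chars.strIsdigit s = true)) = PySem.Chars.strIsdigit s := by
  by_cases h : PySem.Chars.strIsdigit s = true
  · have hne : s ≠ [] := by
      intro he; rw [he] at h; exact absurd h (by decide)
    simp [h, hne]
  · simp [h]

theorem pyGetD_neg_one {α : Type} (l : List α) (h : l ≠ []) (d : α) :
    PySem.List.pyGetD l (-1) d = l.getD (l.length - 1) d := by
  have hl : 1 ≤ l.length := List.length_pos_iff.mpr h
  have h2 : -(l.length : Int) ≤ -1 := by omega
  simp [PySem.List.pyGetD, PySem.List.pyGet?, PySem.List.pyIdx?, h2, List.getD_eq_getElem?_getD]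

theorem colAt_getD_last (g : List (List Char)) (hg : g ≠ []) (c : Nat) :
    PySem.List.pyGetD (colAt g c) (-1) ' ' = (g.getD (g.length - 1) []).getD c ' ' := by
  have hl : 0 < g.length := List.length_pos_iff.mpr hg
  have hne : colAt g c ≠ [] := by
    unfold colAt; simp [hg]
  rw [pyGetD_neg_one _ hne]
  have e1 : g.getD (g.length - 1) [] = g[g.length - 1] := by
    rw [List.getD_eq_getElem?_getD, List.getElem?_eq_getElem (by omega)]
    rfl
  rw [e1]
  unfold colAt
  rw [List.getD_eq_getElem?_getD, List.length_map, List.getElem?_map,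
    List.getElem?_eq_getElem (by omega)]
  rfl

theorem op_list_eq (g : List (List Char)) (W a b : Nat) (hg : g ≠ [])
    (hrow : ∀ row ∈ g, row.length = W) (hab : a ≤ b) (hbW : b ≤ W) :
    PySem.List.slice (g.getD (g.length - 1) []) (some (a : Int)) (some (b : Int))
      = (((colsOf g W).drop a).take (b - a)).map (fun col => PySem.List.pyGetD col (-1) ' ') := by
  have hl : 0 < g.length := List.length_pos_iff.mpr hg
  have hmem : g.getD (g.length - 1) [] ∈ g := by
    rw [List.getD_eq_getElem?_getD, List.getElem?_eq_getElem (by omega)]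
    exact List.getElem_mem _
  have hlen : (g.getD (g.length - 1) []).length = W := hrow _ hmem
  rw [PySem.List.slice_natCast, block_eq g W a b hab hbW, List.map_map]
  rw [show ((fun col => PySem.List.pyGetD col (-1) ' ') ∘ colAt g)
      = fun c => (g.getD (g.length - 1) []).getD c ' ' from funext (fun c => colAt_getD_last g hg c)]
  rw [range'_map_getD _ ' ' a (b - a) (by omega)]

theorem nums_eq (g : List (List Char)) (W a b : Nat) (hab : a ≤ b) (hbW : b ≤ W) :
    ((List.range' a (b - a)).foldl (fun nums c =>
        if (PySem.Chars.strip ((List.range (g.length - 1)).map (fun r => (g.getD r []).getD c ' ')) ≠ [] ∧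
            PySem.Chars.strIsdigit (PySem.Chars.strip ((List.range (g.length - 1)).map (fun r => (g.getD r []).getD c ' '))))
        then nums ++ [(PySem.Int.ofChars? (PySem.Chars.strip ((List.range (g.length - 1)).map (fun r => (g.getD r []).getD c ' ')))).getD 0]
        else nums) ([] : List Int))
      = numsOf (((colsOf g W).drop a).take (b - a)) := by
  unfold numsOf
  rw [PySem.List.foldl_append_ite
    (p := fun c => (PySem.Chars.strip ((List.range (g.length - 1)).map (fun r => (g.getD r []).getD c ' ')) ≠ [] ∧
      PySem.Chars.strIsdigit (PySem.Chars.strip ((List.range (g.length - 1)).map (fun r => (g.getD r []).getD c ' ')))))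
    (f := fun c => (PySem.Int.ofChars? (PySem.Chars.strip ((List.range (g.length - 1)).map (fun r => (g.getD r []).getD c ' ')))).getD 0)]
  rw [List.nil_append, block_eq g W a b hab hbW, List.filter_map, List.map_map]
  congr 1
  · -- the mapped functions agree
    funext c
    simp only [Function.comp_apply]
    rw [stripA_eq]
  · -- the filters agree
    apply List.filter_congr
    intro c _
    rw [Function.comp_apply, ← stripA_eq, strIsdigit_cond]

theorem seg_value (g : List (List Char)) (W : Nat) (hg : g ≠ [])
    (hrow : ∀ row ∈ g, row.length = W) (a b : Nat) (hab : a ≤ b) (hbW : b ≤ W) :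
    (let nums := (List.range' a (b - a)).foldl (fun nums c =>
        let col := PySem.Chars.strip ((List.range (g.length - 1)).map (fun r => (g.getD r []).getD c ' '))
        if col ≠ [] ∧ PySem.Chars.strIsdigit col then nums ++ [(PySem.Int.ofChars? col).getD 0]
        else nums) ([] : List Int)
     let op := PySem.Chars.strip (PySem.List.slice (g.getD (g.length - 1) []) (some (a : Int)) (some (b : Int)))
     if op = ['+'] then nums.sum else nums.foldl (· * ·) 1)
    = valBlock (((colsOf g W).drop a).take (b - a)) := by
  unfold valBlock
  simp only []
  rw [nums_eq g W a b hab hbW, op_list_eq g W a b hg hrow hab hbW]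

-- ---------- B side: the streaming pass ----------

theorem foldl_mul_shift (l : List Int) (a : Int) :
    l.foldl (· * ·) a = a * l.foldl (· * ·) 1 := by
  induction l generalizing a with
  | nil => simp
  | cons x xs ih =>
    simp only [List.foldl_cons]
    rw [ih (a * x), ih (1 * x)]
    ring

theorem numsOf_cons (col : List Char) (bs : List (List Char)) :
    numsOf (col :: bs)
      = (if PySem.Chars.strIsdigit (PySem.Chars.strip col.dropLast)
         then [(PySem.Int.ofChars? (PySem.Chars.strip col.dropLast)).getD 0] else []) ++ numsOf bs := by
  unfold numsOf
  by_cases h : PySem.Chars.strIsdigit (PySem.Chars.strip col.dropLast)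
  · simp [h]
  · simp [h]

theorem stepB_nonblank (col : List Char) (hc : isBlankCol col = false)
    (total s p : Int) (op : List Char) (flag : Bool) :
    stepB col (total, s, p, op, flag)
      = (total,
         (if PySem.Chars.strIsdigit (PySem.Chars.strip col.dropLast)
          then s + (PySem.Int.ofChars? (PySem.Chars.strip col.dropLast)).getD 0 else s),
         (if PySem.Chars.strIsdigit (PySem.Chars.strip col.dropLast)
          then p * (PySem.Int.ofChars? (PySem.Chars.strip col.dropLast)).getD 0 else p),
         op ++ [PySem.List.pyGetD col (-1) ' '], true) := by
  have hc' : (col.all (· == ' ')) = false := hc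
  dsimp only [stepB]
  rw [if_neg (c := (col.all (· == ' ')) = true) (by simp [hc'])]
  by_cases h : PySem.Chars.strIsdigit (PySem.Chars.strip col.dropLast)
  · simp [h]
  · simp [h]

-- a run of non-blank columns just accumulates sum, product and operator characters
theorem run_lemma (block : List (List Char)) (hb : ∀ col ∈ block, isBlankCol col = false) :
    ∀ (total s p : Int) (op : List Char) (flag : Bool),
    block.foldl (fun st col => stepB col st) (total, s, p, op, flag)
      = (total, s + (numsOf block).sum, p * (numsOf block).foldl (· * ·) 1,
         op ++ block.map (fun col => PySem.List.pyGetD col (-1) ' '),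
         if block.isEmpty then flag else true) := by
  induction block with
  | nil => intro total s p op flag; simp [numsOf]
  | cons col bs ih =>
    intro total s p op flag
    have hcol : isBlankCol col = false := hb col (by simp)
    have hbs : ∀ c ∈ bs, isBlankCol c = false := fun c hc => hb c (by simp [hc])
    simp only [List.foldl_cons]
    rw [stepB_nonblank col hcol total s p op flag]
    rw [ih hbs]
    rw [numsOf_cons]
    by_cases h : PySem.Chars.strIsdigit (PySem.Chars.strip col.dropLast)
    · simp only [if_pos h, List.singleton_append, List.sum_cons, List.foldl_cons]
      refine Prod.ext rfl (Prod.ext ?_ (Prod.ext ?_ (Prod.ext (by simp) (by simp))))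
      · simp; ring
      · simp only []
        rw [foldl_mul_shift (numsOf bs) (1 * ((PySem.Int.ofChars? (PySem.Chars.strip col.dropLast)).getD 0))]
        ring
    · simp only [if_neg h, List.nil_append]
      refine Prod.ext rfl (Prod.ext rfl (Prod.ext rfl (Prod.ext (by simp) (by simp))))

-- the streaming pass from a clean state computes the per-run totals of groupRuns
theorem stream_eq (n : Nat) : ∀ (cols : List (List Char)), cols.length ≤ n → ∀ (total : Int),
    finishB (cols.foldl (fun st col => stepB col st) (total, 0, 1, [], false))
      = (groupRuns cols).foldl (fun a b => a + valBlock b) total := by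
  induction n with
  | zero =>
    intro cols hn total
    have : cols = [] := List.length_eq_zero_iff.mp (by omega)
    subst this
    simp [groupRuns, finishB]
  | succ n ih =>
    intro cols hn total
    match cols with
    | [] => simp [groupRuns, finishB]
    | c :: rest =>
      by_cases hc : isBlankCol c
      · have hstep : stepB c (total, 0, 1, [], false) = (total, 0, 1, [], false) := by
          have hc' : (c.all (· == ' ')) = true := hc
          simp [stepB, finishB, hc']
        rw [List.foldl_cons, hstep, groupRuns, if_pos hc]
        exact ih rest (by simpa using Nat.lt_succ_iff.mp (by simpa using hn)) total
      · -- non-blank run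
        set tw := (c :: rest).takeWhile (fun d => !isBlankCol d) with htw
        set dw := (c :: rest).dropWhile (fun d => !isBlankCol d) with hdw
        have htw' : tw = c :: rest.takeWhile (fun d => !isBlankCol d) := by
          rw [htw, List.takeWhile_cons, if_pos (by simp [hc])]
        have hdw' : dw = rest.dropWhile (fun d => !isBlankCol d) := by
          rw [hdw, List.dropWhile_cons, if_pos (by simp [hc])]
        have hsplit : c :: rest = tw ++ dw := (List.takeWhile_append_dropWhile).symm
        have htwnb : ∀ col ∈ tw, isBlankCol col = false := by
          intro col hcol
          have := List.mem_takeWhile_imp hcol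
          simpa using this
        have hlen : tw.length + dw.length = rest.length + 1 := by
          have := congrArg List.length hsplit
          simp at this
          omega
        have htwE : tw.isEmpty = false := by
          rw [htw']; rfl
        have hgr : groupRuns (c :: rest) = tw :: groupRuns dw := by
          rw [groupRuns, if_neg hc, htw', hdw']
        rw [hgr, hsplit, List.foldl_append]
        rw [run_lemma tw htwnb total 0 1 [] false]
        rw [htwE]
        simp only [List.nil_append, zero_add, one_mul, Bool.false_eq_true, if_false]
        match hdwm : dw with
        | [] =>
          simp [groupRuns, finishB, valBlock]
        | d :: rest' =>
          have hd : isBlankCol d = true := by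
            have := List.head?_dropWhile_not (fun x => !isBlankCol x) rest
            rw [← hdw'] at this
            simpa using this
          have hstep : stepB d ((total, (numsOf tw).sum, (numsOf tw).foldl (· * ·) 1,
              tw.map (fun col => PySem.List.pyGetD col (-1) ' '), true))
              = (total + valBlock tw, 0, 1, [], false) := by
            have hd' : (d.all (· == ' ')) = true := hd
            simp [stepB, finishB, valBlock, hd']
          rw [List.foldl_cons, hstep]
          have hrest' : rest'.length ≤ n := by
            simp at hlen hn
            omega
          rw [ih rest' hrest' (total + valBlock tw)]
          rw [groupRuns, if_pos hd, List.foldl_cons]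

-- ===== VERDICT (by name: the statement is the Claim_ definition above) =====
theorem solve_spec : Claim_equal_solve := by
  intro input _
  unfold Spec_solve solve solve_alt
  simp only []
  set lines := PySem.Chars.splitOn (rstripNl input.toList) ['\n'] with hlines
  set W := (lines.map List.length).foldl max 0 with hW
  set g := lines.map (fun l => ljustSp l W) with hgdef
  have hlne : lines ≠ [] := splitOn_ne_nil _ _
  have hg : g ≠ [] := by
    rw [hgdef]; simpa using hlne
  have hlen : lines.length = g.length := by rw [hgdef, List.length_map]
  have hrow : ∀ row ∈ g, row.length = W := by
    intro row hr
    rw [hgdef] at hr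
    obtain ⟨l, hl, rfl⟩ := List.mem_map.mp hr
    have hle : l.length ≤ W := by
      rw [hW, List.foldl_map]
      exact (PySem.List.le_foldl_max_nat lines List.length 0).2 l hl
    unfold ljustSp
    simp
    omega
  rw [hlen]
  apply congrArg
  -- A's side: total = fold of per-block values over groupRuns
  rw [sc_eq g W, segLoop_eq, List.nil_append]
  have hA : ∀ seg : List (Nat × Nat), seg.foldl (fun t ab =>
      let nums := (List.range' ab.1 (ab.2 - ab.1)).foldl (fun nums c =>
        let col := PySem.Chars.strip ((List.range (g.length - 1)).map (fun r => (g.getD r []).getD c ' '))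
        if col ≠ [] ∧ PySem.Chars.strIsdigit col then nums ++ [(PySem.Int.ofChars? col).getD 0]
        else nums) ([] : List Int)
      let op := PySem.Chars.strip (PySem.List.slice (g.getD (g.length - 1) []) (some (ab.1 : Int)) (some (ab.2 : Int)))
      let v := if op = ['+'] then nums.sum else nums.foldl (· * ·) 1
      t + v) (0 : Int) = (seg.map (fun ab =>
        let nums := (List.range' ab.1 (ab.2 - ab.1)).foldl (fun nums c =>
          let col := PySem.Chars.strip ((List.range (g.length - 1)).map (fun r => (g.getD r []).getD c ' '))
          if col ≠ [] ∧ PySem.Chars.strIsdigit col then nums ++ [(PySem.Int.ofChars? col).getD 0]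
          else nums) ([] : List Int)
        let op := PySem.Chars.strip (PySem.List.slice (g.getD (g.length - 1) []) (some (ab.1 : Int)) (some (ab.2 : Int)))
        if op = ['+'] then nums.sum else nums.foldl (· * ·) 1)).sum := by
    intro seg
    rw [PySem.List.foldl_add]
    simp
  rw [hA]
  -- B's side: fold over range W = fold over the column list, then the streaming lemma
  have hBcols : (List.range W).foldl
      (fun st c => stepB (g.map (fun row => row.getD c ' ')) st)
      ((0 : Int), (0 : Int), (1 : Int), ([] : List Char), false)
      = (colsOf g W).foldl (fun st col => stepB col st)
        ((0 : Int), (0 : Int), (1 : Int), ([] : List Char), false) := by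
    unfold colsOf colAt
    rw [List.foldl_map]
  rw [hBcols, stream_eq (colsOf g W).length (colsOf g W) le_rfl 0]
  rw [PySem.List.foldl_add]
  rw [Int.zero_add]
  -- both are the sum over groupRuns of valBlock
  have hmap := segs_map (colsOf g W)
    (fun ab =>
      let nums := (List.range' ab.1 (ab.2 - ab.1)).foldl (fun nums c =>
        let col := PySem.Chars.strip ((List.range (g.length - 1)).map (fun r => (g.getD r []).getD c ' '))
        if col ≠ [] ∧ PySem.Chars.strIsdigit col then nums ++ [(PySem.Int.ofChars? col).getD 0]
        else nums) ([] : List Int)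
      let op := PySem.Chars.strip (PySem.List.slice (g.getD (g.length - 1) []) (some (ab.1 : Int)) (some (ab.2 : Int)))
      if op = ['+'] then nums.sum else nums.foldl (· * ·) 1)
    valBlock
    (by
      intro a b hab hbW'
      have hbW : b ≤ W := by simpa [colsOf] using hbW'
      exact seg_value g W hg hrow a b hab hbW)
    (colsOf g W).length 0 (by omega) (by omega)
  rw [List.drop_zero] at hmap
  rw [hmap]
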